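-- pv_equiv track=rewrite | github.com/magictext/leetcode | src/accountMerge/account.py | reStruct
-- ===== SOURCE A (Python) =====
-- def reStruct(accounts, groups):
--     ht = {}
--     for k, v in groups.items():
--         if v not in ht:
--             ht[v] = []
--         ht[v].append(k)
--     ht2 = {}
--     for account in accounts:
--         name = account[0]
--         email = account[1]
--         gid = groups[email]
--         ht2[gid] = name
--     ret = []
--     for k, v in ht.items():
--         ret.append([ht2[k]] + sorted(v))
--     return ret
-- ===== SOURCE B (Python) =====
-- def reStruct(accounts, groups):
--     buckets = {}
--     for gid in groups.values():
--         buckets.setdefault(gid, [])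
--     names = {}
--     for account in accounts:
--         names[groups[account[1]]] = account[0]
--     for email in sorted(groups):
--         buckets[groups[email]].append(email)
--     return [[names[gid]] + emails for gid, emails in buckets.items()]
-- ===== Notes on version B (the rewrite author's own statement) =====
-- stated objective: alternative
-- what changed: A sorts each group's email list separately at output time; B performs one global sort of all emails and then distributes them into the group buckets in a single pass, so no per-group sort remains.
import Mathlib
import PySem

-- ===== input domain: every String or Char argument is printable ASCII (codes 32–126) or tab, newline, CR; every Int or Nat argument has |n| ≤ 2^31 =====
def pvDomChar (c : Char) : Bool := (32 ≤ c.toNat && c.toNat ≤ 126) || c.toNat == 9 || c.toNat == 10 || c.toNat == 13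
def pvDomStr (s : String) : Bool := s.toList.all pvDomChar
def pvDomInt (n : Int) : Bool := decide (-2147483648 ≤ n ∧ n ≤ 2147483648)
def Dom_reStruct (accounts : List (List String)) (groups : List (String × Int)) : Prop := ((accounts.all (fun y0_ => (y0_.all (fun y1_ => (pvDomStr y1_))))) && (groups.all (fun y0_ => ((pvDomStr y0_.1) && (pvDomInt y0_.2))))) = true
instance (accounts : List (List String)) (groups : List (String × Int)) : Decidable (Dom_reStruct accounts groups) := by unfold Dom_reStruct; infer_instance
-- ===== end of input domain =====

-- B replaces A's per-group sort at output time by ONE global sort of all emails followed by a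
-- distribution pass into the group buckets (objective: alternative decomposition, same cost class).

-- ===== PORT A =====
def reStruct (accounts : List (List String)) (groups : List (String × Int)) : List (List String) :=
  let g : PySem.Dict String Int := PySem.Dict.ofList groups
  let ht : PySem.Dict Int (List String) :=
    g.items.foldl (fun ht kv =>
      let ht := if ht.contains kv.2 then ht else ht.insert kv.2 []
      ht.modify kv.2 [] (fun l => l ++ [kv.1])) PySem.Dict.empty
  let ht2 : PySem.Dict Int String :=
    accounts.foldl (fun d account =>
      let name := PySem.List.pyGetD account 0 ""
      let email := PySem.List.pyGetD account 1 ""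
      let gid := (g.get? email).getD 0
      d.insert gid name) PySem.Dict.empty
  ht.items.foldl (fun ret kv =>
    ret ++ [((ht2.get? kv.1).getD "") :: PySem.List.sorted kv.2 (fun x => x) false]) []

-- ===== PORT B =====
def reStruct_alt (accounts : List (List String)) (groups : List (String × Int)) : List (List String) :=
  let g : PySem.Dict String Int := PySem.Dict.ofList groups
  let buckets : PySem.Dict Int (List String) :=
    g.values.foldl (fun d gid => d.setdefault gid []) (PySem.Dict.empty : PySem.Dict Int (List String))
  let names : PySem.Dict Int String :=
    accounts.foldl (fun d account =>
      d.insert ((g.get? (PySem.List.pyGetD account 1 "")).getD 0) (PySem.List.pyGetD account 0 "")) PySem.Dict.empty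
  let buckets2 : PySem.Dict Int (List String) :=
    (PySem.List.sorted g.keys (fun x => x) false).foldl
      (fun d email => d.modify ((g.get? email).getD 0) [] (fun l => l ++ [email])) buckets
  buckets2.items.map (fun kv => ((names.get? kv.1).getD "") :: kv.2)

-- ===== PRECONDITION & SPEC =====
-- Pre_ excludes exactly the inputs where Python A raises: an account with fewer than 2 entries or an
-- email not in groups (IndexError/KeyError building ht2), and a group id no account refers to
-- (KeyError at ht2[k] in the output loop).
def Pre_reStruct (accounts : List (List String)) (groups : List (String × Int)) : Prop :=
  (∀ a ∈ accounts, 2 ≤ a.length ∧ (PySem.Dict.ofList groups).contains (a.getD 1 "") = true) ∧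
  (∀ p ∈ (PySem.Dict.ofList groups).items, ∃ a ∈ accounts,
      (PySem.Dict.ofList groups).get? (a.getD 1 "") = some p.2)
instance (accounts : List (List String)) (groups : List (String × Int)) : Decidable (Pre_reStruct accounts groups) := by unfold Pre_reStruct; infer_instance

def pvWitness_reStruct : List (List String) × (List (String × Int)) :=
  ([["alice", "a@x", "extra"], ["bob", "b@x"]], [("a@x", 1), ("b@x", 2), ("c@x", 1)])

def Spec_reStruct (accounts : List (List String)) (groups : List (String × Int)) (out : List (List String)) : Prop := out = reStruct_alt accounts groups
instance (accounts : List (List String)) (groups : List (String × Int)) (out : List (List String)) : Decidable (Spec_reStruct accounts groups out) := by unfold Spec_reStruct; infer_instance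

-- ===== CLAIM (what is proved, stated in full; the proofs are below) =====
def Claim_equal_reStruct : Prop := ∀ (accounts : List (List String)) (groups : List (String × Int)), Dom_reStruct accounts groups → Pre_reStruct accounts groups → Spec_reStruct accounts groups (reStruct accounts groups)

-- ===== LEMMAS AND PROOFS =====

-- A's grouping step: keys grow exactly like Set.add.
theorem keys_stepA (d : PySem.Dict Int (List String)) (kv : String × Int) :
    ((if d.contains kv.2 then d else d.insert kv.2 []).modify kv.2 [] (fun l => l ++ [kv.1])).keys
      = PySem.Set.add d.keys kv.2 := by
  by_cases h : d.contains kv.2 = true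
  · rw [if_pos h, PySem.Dict.keys_modify, PySem.Dict.keys_insert_of_contains _ _ h,
      PySem.Set.add_of_mem ((PySem.Dict.contains_iff_mem_keys d kv.2).mp h)]
  · rw [if_neg (by simp [Bool.not_eq_true] at h ⊢; exact h), PySem.Dict.keys_modify,
      PySem.Dict.keys_insert_of_contains _ _ (PySem.Dict.contains_insert_self d kv.2 []),
      PySem.Dict.keys_insert_of_not_contains _ _ (by simpa using h),
      PySem.Set.add_of_not_mem]
    intro hmem
    exact absurd ((PySem.Dict.contains_iff_mem_keys d kv.2).mpr hmem) (by simpa using h)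

theorem keys_foldA (l : List (String × Int)) (d : PySem.Dict Int (List String)) :
    (l.foldl (fun ht kv =>
        let ht := if ht.contains kv.2 then ht else ht.insert kv.2 []
        ht.modify kv.2 [] (fun l => l ++ [kv.1])) d).keys
      = PySem.Set.update d.keys (l.map (·.2)) := by
  induction l generalizing d with
  | nil => simp [PySem.Set.update]
  | cons kv l ih =>
    rw [List.foldl_cons, ih, List.map_cons, PySem.Set.update_cons]
    congr 1
    exact keys_stepA d kv

theorem keys_foldSetdefault (l : List Int) (d : PySem.Dict Int (List String)) :
    (l.foldl (fun d gid => d.setdefault gid []) d).keys = PySem.Set.update d.keys l := by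
  induction l generalizing d with
  | nil => simp [PySem.Set.update]
  | cons x l ih =>
    rw [List.foldl_cons, ih, PySem.Set.update_cons]
    congr 1
    by_cases h : d.contains x = true
    · rw [PySem.Dict.setdefault_of_contains _ _ h,
        PySem.Set.add_of_mem ((PySem.Dict.contains_iff_mem_keys d x).mp h)]
    · rw [PySem.Dict.setdefault_of_not_contains _ _ (by simpa using h),
        PySem.Dict.keys_insert_of_not_contains _ _ (by simpa using h),
        PySem.Set.add_of_not_mem]
      intro hmem
      exact absurd ((PySem.Dict.contains_iff_mem_keys d x).mpr hmem) (by simpa using h)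

-- A's grouping fold collects, per group id, the first components in list order.
theorem getD_foldA (l : List (String × Int)) (d : PySem.Dict Int (List String)) (c : Int) :
    (l.foldl (fun ht kv =>
        let ht := if ht.contains kv.2 then ht else ht.insert kv.2 []
        ht.modify kv.2 [] (fun l => l ++ [kv.1])) d).getD c []
      = d.getD c [] ++ (l.filter (fun kv => kv.2 == c)).map (·.1) := by
  induction l generalizing d with
  | nil => simp
  | cons kv l ih =>
    rw [List.foldl_cons, ih]
    have hstep : ((if d.contains kv.2 then d else d.insert kv.2 []).modify kv.2 []
        (fun l => l ++ [kv.1])).getD c []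
        = if kv.2 == c then d.getD c [] ++ [kv.1] else d.getD c [] := by
      by_cases h : d.contains kv.2 = true
      · rw [if_pos h, PySem.Dict.getD_modify]
        by_cases hc : kv.2 = c
        · subst hc; simp
        · simp [hc, Ne.symm hc]
      · rw [if_neg (by simpa using h), PySem.Dict.getD_modify]
        by_cases hc : kv.2 = c
        · subst hc
          simp [PySem.Dict.getD_of_not_contains d [] (by simpa using h)]
        · simp [hc, Ne.symm hc, PySem.Dict.getD_insert]
    rw [hstep]
    by_cases hc : kv.2 = c
    · simp [hc]
    · simp [hc]

theorem getD_foldSetdefault (l : List Int) (d : PySem.Dict Int (List String)) (c : Int)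
    (h : d.getD c [] = []) :
    (l.foldl (fun d gid => d.setdefault gid []) d).getD c [] = [] := by
  induction l generalizing d with
  | nil => simpa using h
  | cons x l ih =>
    rw [List.foldl_cons]
    apply ih
    by_cases hx : d.contains x = true
    · rw [PySem.Dict.setdefault_of_contains _ _ hx]; exact h
    · rw [PySem.Dict.setdefault_of_not_contains _ _ (by simpa using hx),
        PySem.Dict.getD_insert]
      split <;> simp [h]

-- The heart of the proof: A's per-bucket sort equals B's global-sort-then-distribute.
theorem reStruct_main (accounts : List (List String)) (groups : List (String × Int)) :
    reStruct accounts groups = reStruct_alt accounts groups := by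
  unfold reStruct reStruct_alt
  dsimp only
  rw [PySem.List.foldl_append_singleton_eq_map, List.nil_append]
  have nd : (PySem.Dict.ofList groups).keys.Nodup := PySem.Dict.nodup_keys_ofList groups
  set g := PySem.Dict.ofList groups with hg
  set G : String → Int := fun e => (g.get? e).getD 0 with hG
  set sk := PySem.List.sorted g.keys (fun x => x) false with hsk
  have hkeysL : g.keys = g.items.map (·.1) := rfl
  have hvals : g.values = g.items.map (·.2) := rfl
  -- keys of A's grouping dict
  have hA : (g.items.foldl (fun ht kv =>
        let ht := if ht.contains kv.2 then ht else ht.insert kv.2 []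
        ht.modify kv.2 [] (fun l => l ++ [kv.1])) PySem.Dict.empty).keys
      = PySem.Set.ofList (g.items.map (·.2)) := by
    rw [keys_foldA]
    simp [PySem.Set.update_nil_left]
  -- keys of B's initial buckets
  have hB0 : (g.values.foldl (fun d gid => d.setdefault gid []) (PySem.Dict.empty : PySem.Dict Int (List String))).keys
      = PySem.Set.ofList (g.items.map (·.2)) := by
    rw [keys_foldSetdefault, hvals]
    simp [PySem.Set.update_nil_left]
  -- the distribution pass only touches keys already present
  have hGmem : ∀ y ∈ sk.map G, y ∈ PySem.Set.ofList (g.items.map (·.2)) := by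
    intro y hy
    rcases List.mem_map.mp hy with ⟨e, he, rfl⟩
    have he' : e ∈ g.keys := (PySem.List.mem_sorted _ _ _ _).mp he
    rw [hkeysL] at he'
    rcases List.mem_map.mp he' with ⟨kv, hkv, rfl⟩
    have : g.get? kv.1 = some kv.2 :=
      PySem.Dict.get?_of_mem_items g (by simpa using hkv) nd
    rw [PySem.Set.mem_ofList]
    exact List.mem_map.mpr ⟨kv, hkv, by simp [hG, this]⟩
  have hB2 : ((PySem.List.sorted g.keys (fun x => x) false).foldl
        (fun d email => d.modify ((g.get? email).getD 0) [] (fun l => l ++ [email]))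
        (g.values.foldl (fun d gid => d.setdefault gid []) (PySem.Dict.empty : PySem.Dict Int (List String)))).keys
      = PySem.Set.ofList (g.items.map (·.2)) := by
    rw [PySem.Dict.keys_foldl_modify_key _ (fun e => (g.get? e).getD 0) [] (fun _ e => fun l => l ++ [e]),
      hB0, PySem.Set.update_eq_append_filter]
    have : (PySem.Set.ofList (sk.map G)).filter
        (fun y => !(PySem.Set.ofList (g.items.map (·.2))).contains y) = [] := by
      apply List.filter_eq_nil_iff.mpr
      intro y hy
      have hmem := hGmem y ((PySem.Set.mem_ofList _ _).mp hy)
      have hc := (PySem.Set.contains_iff _ _).mpr hmem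
      simp only [hc, Bool.not_true]
      simp
    rw [← hsk, ← hG, this, List.append_nil]
  have ndS : (PySem.Set.ofList (g.items.map (·.2))).Nodup := PySem.Set.nodup_ofList _
  rw [PySem.Dict.items_eq_map_keys _ (hA ▸ ndS) ([] : List String),
    PySem.Dict.items_eq_map_keys _ (hB2 ▸ ndS) ([] : List String),
    hA, hB2, List.map_map, List.map_map]
  apply List.map_congr_left
  intro k hk
  simp only [Function.comp]
  congr 1
  -- per-bucket email lists
  rw [getD_foldA]
  have hb2v : ((PySem.List.sorted g.keys (fun x => x) false).foldl
        (fun d email => d.modify ((g.get? email).getD 0) [] (fun l => l ++ [email]))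
        (g.values.foldl (fun d gid => d.setdefault gid []) (PySem.Dict.empty : PySem.Dict Int (List String)))).getD k []
      = sk.filter (fun e => G e == k) := by
    have h1 : (PySem.List.sorted g.keys (fun x => x) false).foldl
        (fun d email => d.modify ((g.get? email).getD 0) [] (fun l => l ++ [email]))
        (g.values.foldl (fun d gid => d.setdefault gid []) (PySem.Dict.empty : PySem.Dict Int (List String)))
        = (sk.map (fun e => (G e, e))).foldl
            (fun d p => d.modify p.1 [] (fun l => l ++ [p.2]))
            (g.values.foldl (fun d gid => d.setdefault gid []) (PySem.Dict.empty : PySem.Dict Int (List String))) := by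
      rw [List.foldl_map]
    rw [h1, PySem.Dict.getD_foldl_modify_append,
      getD_foldSetdefault _ _ _ (by simp), List.nil_append, List.filter_map]
    simp [Function.comp_def]
  rw [hb2v]
  have hfilt : ((g.items.filter (fun kv => kv.2 == k)).map (·.1))
      = g.keys.filter (fun e => G e == k) := by
    rw [hkeysL, List.filter_map]
    congr 1
    apply List.filter_congr
    intro kv hkv
    have : g.get? kv.1 = some kv.2 :=
      PySem.Dict.get?_of_mem_items g (by simpa using hkv) nd
    simp [Function.comp, hG, this]
  rw [PySem.Dict.getD_empty, List.nil_append, hfilt]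
  apply PySem.List.sorted_eq_of_perm_of_pairwise_lt
  · exact (PySem.List.sorted_perm g.keys (fun x => x) false).filter _
  · have hle := PySem.List.sorted_pairwise g.keys (fun x => x)
    have hnd : sk.Nodup := ((PySem.List.sorted_perm g.keys (fun x => x) false).nodup_iff).mpr nd
    have hlt : sk.Pairwise (fun a b => a < b) :=
      (hle.and hnd).imp (fun h => lt_of_le_of_ne h.1 h.2)
    exact hlt.sublist List.filter_sublist

-- ===== VERDICT (by name: the statement is the Claim_ definition above) =====
theorem reStruct_spec : Claim_equal_reStruct := by
  intro accounts groups _ _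
  exact reStruct_main accounts groups
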